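-- pv_equiv track=rewrite | github.com/shweta1609/Course-Recommendation-System | Course Recommendation System/course-review/RecommendationSystem/UserBasedCF/myUtil_u.py | vectorToCourseTokenList
-- ===== SOURCE A (Python) =====
-- def vectorToCourseTokenList(v,c,courseNum):
--     colNum=len(v)
--     tookIndex=[]
--     for i in range(courseNum):
--         courseTookFlag=False
--         for j in range(c):
--             courseTookFlag=courseTookFlag or (v[c*i+j]!=0) # if all course attr is non zero, the this course took before
--         if courseTookFlag:
--             tookIndex.append(i)
--     return tookIndex
-- ===== SOURCE B (Python) =====
-- def vectorToCourseTokenList(v, c, courseNum):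
--     took = set()
--     for idx in range(courseNum * c):
--         if v[idx] != 0:
--             took.add(idx // c)
--     return sorted(took)
-- ===== Notes on version B (the rewrite author's own statement) =====
-- stated objective: alternative
-- what changed: Replaces the nested course-by-attribute loop with per-course boolean flag by a single flat pass over the vector that maps each nonzero position to its course via integer division into a set, then returns the sorted set.
-- outside the precondition, e.g. on vectorToCourseTokenList([5], -1, -1): A returns [], B returns [0]
import Mathlib
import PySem

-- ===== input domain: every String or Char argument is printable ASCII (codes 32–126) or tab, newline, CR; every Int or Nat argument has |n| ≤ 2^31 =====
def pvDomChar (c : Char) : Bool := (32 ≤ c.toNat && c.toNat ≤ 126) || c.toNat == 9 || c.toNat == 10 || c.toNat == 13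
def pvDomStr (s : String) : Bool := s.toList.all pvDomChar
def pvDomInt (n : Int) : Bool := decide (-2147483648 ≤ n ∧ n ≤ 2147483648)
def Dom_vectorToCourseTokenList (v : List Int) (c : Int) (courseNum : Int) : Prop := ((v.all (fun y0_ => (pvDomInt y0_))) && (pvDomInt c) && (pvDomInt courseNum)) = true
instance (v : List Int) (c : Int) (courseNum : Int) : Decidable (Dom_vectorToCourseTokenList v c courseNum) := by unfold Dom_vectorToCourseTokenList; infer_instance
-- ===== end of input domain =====

-- B replaces A's nested (course × attribute) loop with one flat pass over the vector,
-- mapping nonzero positions to their course by integer division into a set, then sorting (objective: alternative).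

-- ===== PORT A =====
-- v[c*i+j] is read with pyGet?; its `none` (Python IndexError) is excluded by Pre_, so `.getD 0` is exact there.
def vectorToCourseTokenList (v : List Int) (c : Int) (courseNum : Int) : List Int :=
  (PySem.List.pyRange 0 courseNum 1).foldl (fun tookIndex i =>
    let courseTookFlag := (PySem.List.pyRange 0 c 1).foldl (fun f j =>
      f || !((PySem.List.pyGet? v (c * i + j)).getD 0 == 0)) false
    if courseTookFlag then tookIndex ++ [i] else tookIndex) []

-- ===== PORT B =====
def vectorToCourseTokenList_alt (v : List Int) (c : Int) (courseNum : Int) : List Int :=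
  let took : PySem.Set Int :=
    (PySem.List.pyRange 0 (courseNum * c) 1).foldl (fun s idx =>
      if (PySem.List.pyGet? v idx).getD 0 ≠ 0 then PySem.Set.add s (PySem.Int.floordiv idx c) else s)
      PySem.Set.empty
  PySem.List.sorted took (fun x => x) false

-- ===== PRECONDITION & SPEC =====
-- Pre_ excludes (i) inputs where A raises IndexError (both counts positive but c*courseNum > len(v)), and
-- (ii) the corner where BOTH counts are negative, on which A's value [] is an accident of Python's empty ranges
-- (outside the task's natural domain of nonnegative counts) and B's flat pass does not reproduce it.
def Pre_vectorToCourseTokenList (v : List Int) (c : Int) (courseNum : Int) : Prop :=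
  (0 ≤ c ∨ 0 ≤ courseNum) ∧ (courseNum ≤ 0 ∨ c ≤ 0 ∨ c * courseNum ≤ (v.length : Int))
instance (v : List Int) (c : Int) (courseNum : Int) : Decidable (Pre_vectorToCourseTokenList v c courseNum) := by unfold Pre_vectorToCourseTokenList; infer_instance
def pvWitness_vectorToCourseTokenList : List Int × Int × Int := ([1, 0, 2, 0], 2, 2)
def Spec_vectorToCourseTokenList (v : List Int) (c : Int) (courseNum : Int) (out : List Int) : Prop := out = vectorToCourseTokenList_alt v c courseNum
instance (v : List Int) (c : Int) (courseNum : Int) (out : List Int) : Decidable (Spec_vectorToCourseTokenList v c courseNum out) := by unfold Spec_vectorToCourseTokenList; infer_instance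

-- ===== CLAIM (what is proved, stated in full; the proofs are below) =====
def Claim_equal_vectorToCourseTokenList : Prop := ∀ (v : List Int) (c : Int) (courseNum : Int), Dom_vectorToCourseTokenList v c courseNum → Pre_vectorToCourseTokenList v c courseNum → Spec_vectorToCourseTokenList v c courseNum (vectorToCourseTokenList v c courseNum)

-- ===== LEMMAS AND PROOFS =====

-- a Python 'flag = flag or q(j)' loop is an 'any' over the range
theorem foldl_or_eq_any {α : Type} (l : List α) (q : α → Bool) (b : Bool) :
    l.foldl (fun f j => f || q j) b = (b || l.any q) := by
  induction l generalizing b with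
  | nil => simp
  | cons x t ih => simp [List.foldl_cons, ih, Bool.or_assoc]

-- ===== VERDICT (by name: the statement is the Claim_ definition above) =====
theorem vectorToCourseTokenList_spec : Claim_equal_vectorToCourseTokenList := by
  intro v c courseNum _ hpre
  obtain ⟨hor, _⟩ := hpre
  unfold Spec_vectorToCourseTokenList
  by_cases hc : 0 ≤ c
  swap
  · -- c < 0 (so 0 ≤ courseNum): all ranges involved are empty, both sides are []
    have hn : 0 ≤ courseNum := hor.resolve_left hc
    have h1 : PySem.List.pyRange 0 c 1 = [] := PySem.List.pyRange_one_eq_nil (by omega)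
    have h2 : PySem.List.pyRange 0 (courseNum * c) 1 = [] :=
      PySem.List.pyRange_one_eq_nil (by nlinarith [hn, hc, Int.not_le.mp hc])
    unfold vectorToCourseTokenList vectorToCourseTokenList_alt
    rw [h1, h2]
    simp [PySem.List.sorted, PySem.Set.empty]
  have hA : vectorToCourseTokenList v c courseNum
      = (PySem.List.pyRange 0 courseNum 1).filter
          (fun i => (PySem.List.pyRange 0 c 1).any
            (fun j => !((PySem.List.pyGet? v (c * i + j)).getD 0 == 0))) := by
    unfold vectorToCourseTokenList
    simp only [foldl_or_eq_any, Bool.false_or]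
    rw [PySem.List.foldl_append_if_eq_filter]
    simp
  have hB : vectorToCourseTokenList_alt v c courseNum
      = PySem.List.sorted (PySem.Set.ofList
          (((PySem.List.pyRange 0 (courseNum * c) 1).filter
              (fun idx => decide ((PySem.List.pyGet? v idx).getD 0 ≠ 0))).map
            (fun idx => PySem.Int.floordiv idx c))) (fun x => x) false := by
    unfold vectorToCourseTokenList_alt
    rw [PySem.List.foldl_ite_eq_foldl_filter]
    rw [← PySem.Set.update_map_eq_foldl_add, PySem.Set.update_empty]
  rw [hA, hB]
  refine (PySem.List.sorted_eq_of_perm_of_pairwise_lt _ _ _ ?_ ?_).symm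
  · -- Perm
    rw [List.perm_ext_iff_of_nodup
      ((PySem.List.nodup_pyRange_one 0 courseNum).filter _) (PySem.Set.nodup_ofList _)]
    intro x
    simp only [List.mem_filter, PySem.List.mem_pyRange_one, PySem.Set.mem_ofList, List.mem_map,
      List.any_eq_true, decide_eq_true_eq, ne_eq, Bool.not_eq_true', beq_eq_false_iff_ne]
    constructor
    · rintro ⟨⟨hx0, hxn⟩, j, hjmem, hval⟩
      obtain ⟨hj0, hjc⟩ := hjmem
      have hcpos : 0 < c := lt_of_le_of_lt hj0 hjc
      refine ⟨c * x + j, ⟨⟨by positivity, by nlinarith⟩, hval⟩, ?_⟩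
      rw [PySem.Int.floordiv_eq_iff_of_pos hcpos]
      constructor <;> nlinarith
    · rintro ⟨idx, ⟨⟨hi0, hin⟩, hval⟩, hfx⟩
      have hcpos : 0 < c := by
        rcases hc.lt_or_eq with h | h
        · exact h
        · exfalso; rw [← h, mul_zero] at hin; omega
      have hx : x = PySem.Int.floordiv idx c := hfx.symm
      have hsplit := PySem.Int.floordiv_mul_add_mod idx c
      have hm0 := PySem.Int.mod_nonneg idx hcpos
      have hmc := PySem.Int.mod_lt idx hcpos
      have hx0 : 0 ≤ x := by
        rw [hx]
        exact (PySem.Int.le_floordiv_iff_mul_le hcpos).mpr (by linarith)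
      have hxn : x < courseNum := by
        rw [hx, PySem.Int.floordiv_lt_iff_lt_mul hcpos]
        nlinarith
      refine ⟨⟨hx0, hxn⟩, PySem.Int.mod idx c, ?_, ?_⟩
      · exact ⟨hm0, hmc⟩
      · have : c * x + PySem.Int.mod idx c = idx := by rw [hx]; linarith [hsplit]
        rw [this]; exact hval
  · -- Pairwise <
    exact (PySem.List.pairwise_lt_pyRange_one 0 courseNum).filter _
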